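-- pv_equiv track=rewrite | github.com/CmdrKerfy/tropius-maximus | scripts/manual_set_normalize.py | aggregate_manual_set_stubs
-- ===== SOURCE A (Python) =====
-- def aggregate_manual_set_stubs(card_rows: list[dict]) -> list[dict]:
--     """
--     Build sets rows for manual origin from normalized card rows.
--     Each key is set_id; name is first non-empty set_name seen (stable after normalize).
--     """
--     meta: dict[str, dict] = {}
--     for row in card_rows:
--         sid = row.get("set_id")
--         if not sid:
--             continue
--         sn = row.get("set_name") or ""
--         ss = row.get("set_series")
--         if sid not in meta:
--             meta[sid] = {"name": sn or sid, "series": ss}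
--         else:
--             if sn and (meta[sid]["name"] == sid or not meta[sid]["name"]):
--                 meta[sid]["name"] = sn
--             if ss and not meta[sid].get("series"):
--                 meta[sid]["series"] = ss
--     return [
--         {
--             "id": sid,
--             "name": m["name"] or sid,
--             "series": m.get("series") or None,
--             "origin": "manual",
--         }
--         for sid, m in sorted(meta.items(), key=lambda x: x[0])
--     ]
-- ===== SOURCE B (Python) =====
-- def _first_name(rows, sid):
--     for r in rows:
--         sn = r.get("set_name")
--         if sn and sn != sid:
--             return sn
--     return sid
--
--
-- def _first_series(rows):
--     for r in rows:
--         ss = r.get("set_series")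
--         if ss:
--             return ss
--     return None
--
--
-- def aggregate_manual_set_stubs(card_rows: list[dict]) -> list[dict]:
--     groups: dict[str, list] = {}
--     for row in card_rows:
--         sid = row.get("set_id")
--         if not sid:
--             continue
--         groups.setdefault(sid, []).append(row)
--     return [
--         {
--             "id": sid,
--             "name": _first_name(groups[sid], sid),
--             "series": _first_series(groups[sid]),
--             "origin": "manual",
--         }
--         for sid in sorted(groups)
--     ]
-- ===== Notes on version B (the rewrite author's own statement) =====
-- stated objective: simpler
-- what changed: Replaces A's incremental dict of conditionally-updated name/series stubs by a group-rows-by-set_id pass followed by a per-group reduction (first non-empty set_name different from the id, first truthy set_series).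
import Mathlib
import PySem

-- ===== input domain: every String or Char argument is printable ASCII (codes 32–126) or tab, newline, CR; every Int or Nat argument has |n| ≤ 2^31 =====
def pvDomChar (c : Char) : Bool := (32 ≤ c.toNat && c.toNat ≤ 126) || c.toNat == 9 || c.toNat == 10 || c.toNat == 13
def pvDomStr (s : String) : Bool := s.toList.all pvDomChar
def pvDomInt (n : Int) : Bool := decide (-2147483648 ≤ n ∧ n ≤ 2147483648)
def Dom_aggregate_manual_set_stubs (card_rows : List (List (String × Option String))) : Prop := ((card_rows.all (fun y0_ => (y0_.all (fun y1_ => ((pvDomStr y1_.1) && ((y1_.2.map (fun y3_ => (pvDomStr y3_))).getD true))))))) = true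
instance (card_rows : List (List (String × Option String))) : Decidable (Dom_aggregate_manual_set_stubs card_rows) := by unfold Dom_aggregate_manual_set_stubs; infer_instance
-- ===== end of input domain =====

-- B replaces A's incremental conditional-update aggregation by a group-by-set_id pass followed by a
-- per-group reduction (first genuine name / first truthy series); objective: simpler decomposition, same cost.

-- shared Python-semantics helpers: row.get(k) on a row-dict, and Python truthiness of a str-or-None value
def pvGet (row : List (String × Option String)) (k : String) : Option (Option String) :=
  (PySem.Dict.mk row).get? k

def pvTruthy (o : Option String) : Bool :=
  match o with
  | some s => s ≠ ""
  | none => false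

-- ===== PORT A =====
def pvStepA (ma : PySem.Dict String (String × Option String)) (row : List (String × Option String)) :
    PySem.Dict String (String × Option String) :=
  match pvGet row "set_id" with
  | some (some sid) =>
    if sid = "" then ma  -- 'if not sid: continue'
    else
      let sn : String := match pvGet row "set_name" with  -- row.get("set_name") or ""
        | some (some s) => s
        | _ => ""
      let ss : Option String := (pvGet row "set_series").getD none  -- row.get("set_series")
      if ma.contains sid = false then
        ma.insert sid ((if sn = "" then sid else sn), ss)
      else
        let m := ma.getD sid ("", none)
        let nm := if sn ≠ "" ∧ (m.1 = sid ∨ m.1 = "") then sn else m.1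
        let se := if pvTruthy ss ∧ pvTruthy m.2 = false then ss else m.2
        ma.insert sid (nm, se)
  | _ => ma  -- sid missing or None: falsy, skip

def aggregate_manual_set_stubs (card_rows : List (List (String × Option String))) : List (List (String × Option String)) :=
  let ma := card_rows.foldl pvStepA PySem.Dict.empty
  (PySem.List.sorted ma.items (fun x => x.1)).map (fun p =>
    [("id", some p.1),
     ("name", some (if p.2.1 = "" then p.1 else p.2.1)),   -- m["name"] or sid
     ("series", if pvTruthy p.2.2 then p.2.2 else none),    -- m.get("series") or None
     ("origin", some "manual")])

-- ===== PORT B =====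
def pvNamePick (sid : String) (r : List (String × Option String)) : Option String :=
  match pvGet r "set_name" with
  | some (some s) => if s ≠ "" ∧ s ≠ sid then some s else none
  | _ => none

def pvSeriesPick (r : List (String × Option String)) : Option String :=
  match pvGet r "set_series" with
  | some (some s) => if s ≠ "" then some s else none
  | _ => none

def pvStepB (groups : PySem.Dict String (List (List (String × Option String)))) (row : List (String × Option String)) :
    PySem.Dict String (List (List (String × Option String))) :=
  match pvGet row "set_id" with
  | some (some sid) =>
    if sid = "" then groups
    else groups.modify sid [] (· ++ [row])  -- groups.setdefault(sid, []).append(row)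
  | _ => groups

def aggregate_manual_set_stubs_alt (card_rows : List (List (String × Option String))) : List (List (String × Option String)) :=
  let groups := card_rows.foldl pvStepB PySem.Dict.empty
  (PySem.List.sorted groups.keys (fun k => k)).map (fun sid =>
    let rows := groups.getD sid []
    [("id", some sid),
     ("name", some ((rows.findSome? (pvNamePick sid)).getD sid)),   -- _first_name(rows, sid)
     ("series", rows.findSome? pvSeriesPick),                        -- _first_series(rows)
     ("origin", some "manual")])

-- ===== PRECONDITION & SPEC =====
def Spec_aggregate_manual_set_stubs (card_rows : List (List (String × Option String))) (out : List (List (String × Option String))) : Prop := out = aggregate_manual_set_stubs_alt card_rows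
instance (card_rows : List (List (String × Option String))) (out : List (List (String × Option String))) : Decidable (Spec_aggregate_manual_set_stubs card_rows out) := by unfold Spec_aggregate_manual_set_stubs; infer_instance

-- ===== CLAIM (what is proved, stated in full; the proofs are below) =====
def Claim_equal_aggregate_manual_set_stubs : Prop := ∀ (card_rows : List (List (String × Option String))), Dom_aggregate_manual_set_stubs card_rows → Spec_aggregate_manual_set_stubs card_rows (aggregate_manual_set_stubs card_rows)

-- ===== LEMMAS AND PROOFS =====

-- the invariant tying A's incremental dict to B's group dict after processing the same prefix
def pvR (ma : PySem.Dict String (String × Option String))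
    (groups : PySem.Dict String (List (List (String × Option String)))) : Prop :=
  ma.keys = groups.keys ∧ ma.keys.Nodup ∧
  ∀ sid : String, ma.contains sid = true → sid ≠ "" ∧
    (ma.getD sid ("", none)).1 = ((groups.getD sid []).findSome? (pvNamePick sid)).getD sid ∧
    (if pvTruthy (ma.getD sid ("", none)).2 then (ma.getD sid ("", none)).2 else none)
      = (groups.getD sid []).findSome? pvSeriesPick

lemma pvNamePick_some {sid s : String} {r : List (String × Option String)}
    (h : pvNamePick sid r = some s) : s ≠ "" ∧ s ≠ sid := by
  unfold pvNamePick at h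
  split at h
  · split at h
    · cases h; assumption
    · exact absurd h (by simp)
  · exact absurd h (by simp)

lemma pvSeriesPick_row (row : List (String × Option String)) :
    pvSeriesPick row = (if pvTruthy ((pvGet row "set_series").getD none)
      then (pvGet row "set_series").getD none else none) := by
  unfold pvSeriesPick pvTruthy
  rcases h : pvGet row "set_series" with _ | v
  · simp
  · rcases v with _ | s
    · simp
    · by_cases hs : s = "" <;> simp [hs]

lemma pvName_step (sid : String) (grp : List (List (String × Option String)))
    (row : List (String × Option String)) (hsid : sid ≠ "") :
    (if (match pvGet row "set_name" with | some (some s) => s | _ => "") ≠ "" ∧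
        (((grp.findSome? (pvNamePick sid)).getD sid) = sid ∨ ((grp.findSome? (pvNamePick sid)).getD sid) = "")
     then (match pvGet row "set_name" with | some (some s) => s | _ => "")
     else (grp.findSome? (pvNamePick sid)).getD sid)
    = ((grp ++ [row]).findSome? (pvNamePick sid)).getD sid := by
  rw [List.findSome?_append]
  cases hg : grp.findSome? (pvNamePick sid) with
  | some x =>
    obtain ⟨r, _, hx⟩ := List.exists_of_findSome?_eq_some hg
    obtain ⟨hx1, hx2⟩ := pvNamePick_some hx
    simp [hg, hx1, hx2]
  | none =>
    simp only [hg, Option.getD_none, Option.none_or, List.findSome?_cons, List.findSome?_nil]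
    rcases hn : pvGet row "set_name" with _ | v
    · simp [pvNamePick, hn, hsid]
    · rcases v with _ | s
      · simp [pvNamePick, hn, hsid]
      · by_cases hs : s = ""
        · simp [pvNamePick, hn, hs, hsid]
        · by_cases hss : s = sid
          · simp [pvNamePick, hn, hs, hss]
          · simp [pvNamePick, hn, hs, hss]

lemma pvSeries_step (se ss : Option String) (grp : List (List (String × Option String)))
    (row : List (String × Option String))
    (hss : ss = (pvGet row "set_series").getD none)
    (h : (if pvTruthy se then se else none) = grp.findSome? pvSeriesPick) :
    (if pvTruthy (if pvTruthy ss ∧ pvTruthy se = false then ss else se)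
       then (if pvTruthy ss ∧ pvTruthy se = false then ss else se) else none)
    = (grp ++ [row]).findSome? pvSeriesPick := by
  have hrow : pvSeriesPick row = if pvTruthy ss then ss else none := by
    rw [pvSeriesPick_row, hss]
  rw [List.findSome?_append]
  simp only [List.findSome?_cons, List.findSome?_nil, hrow]
  rcases se with _ | t
  · have h' : grp.findSome? pvSeriesPick = none := by
      simpa [pvTruthy] using h.symm
    cases hS : pvTruthy ss
    · simp [pvTruthy, hS, h']
    · rcases ss with _ | u
      · simp [pvTruthy] at hS
      · have hu : u ≠ "" := by simpa [pvTruthy] using hS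
        simp [pvTruthy, h', hu]
  · by_cases ht : t = ""
    · subst ht
      have h' : grp.findSome? pvSeriesPick = none := by
        simpa [pvTruthy] using h.symm
      cases hS : pvTruthy ss
      · simp [pvTruthy, hS, h']
      · rcases ss with _ | u
        · simp [pvTruthy] at hS
        · have hu : u ≠ "" := by simpa [pvTruthy] using hS
          simp [pvTruthy, h', hu]
    · have h' : grp.findSome? pvSeriesPick = some t := by
        simpa [pvTruthy, ht] using h.symm
      simp [pvTruthy, ht, h']

lemma pvStep_pres (ma : PySem.Dict String (String × Option String))
    (groups : PySem.Dict String (List (List (String × Option String))))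
    (row : List (String × Option String)) (h : pvR ma groups) :
    pvR (pvStepA ma row) (pvStepB groups row) := by
  obtain ⟨hk, hnd, hm⟩ := h
  have hcont : ∀ s, groups.contains s = ma.contains s := fun s => by
    rw [PySem.Dict.contains_eq_decide_mem_keys, PySem.Dict.contains_eq_decide_mem_keys, hk]
  unfold pvStepA pvStepB
  rcases hg : pvGet row "set_id" with _ | v
  · exact ⟨hk, hnd, hm⟩
  rcases v with _ | sid
  · exact ⟨hk, hnd, hm⟩
  by_cases hsid : sid = ""
  · simp only [hsid, if_pos rfl]; exact ⟨hk, hnd, hm⟩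
  simp only [if_neg hsid]
  cases hc : ma.contains sid with
  | false =>
    simp only [hc, eq_self_iff_true, if_true]
    refine ⟨?_, ?_, ?_⟩
    · rw [PySem.Dict.keys_insert_of_not_contains _ _ hc, PySem.Dict.keys_modify,
        PySem.Dict.keys_insert_of_not_contains _ _ (by rw [hcont]; exact hc), hk]
    · rw [PySem.Dict.keys_insert_of_not_contains _ _ hc]
      have hnotmem : sid ∉ ma.keys := fun hmem => by
        have h2 := (PySem.Dict.contains_iff_mem_keys ma sid).mpr hmem
        rw [hc] at h2; cases h2
      simp [List.nodup_append, hnd]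
      exact fun a ha hasid => hnotmem (hasid ▸ ha)
    · intro s hs
      by_cases hssid : s = sid
      · subst hssid
        have hgc : groups.contains s = false := by rw [hcont]; exact hc
        rw [PySem.Dict.getD_insert_self]
        have hgrp : (PySem.Dict.modify groups s [] (· ++ [row])).getD s [] = [row] := by
          rw [PySem.Dict.getD_modify_self, PySem.Dict.getD_of_not_contains _ _ hgc]
          rfl
        rw [hgrp]
        refine ⟨hsid, ?_, ?_⟩
        · have := pvName_step s [] row hsid
          simp only [List.findSome?_nil, Option.getD_none, List.nil_append] at this
          rw [← this]
          by_cases hsn : (match pvGet row "set_name" with | some (some t) => t | _ => "") = ""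
          · simp [hsn]
          · simp [hsn]
        · rw [List.findSome?_cons, List.findSome?_nil, pvSeriesPick_row]
          generalize (if pvTruthy ((pvGet row "set_series").getD none) = true
            then (pvGet row "set_series").getD none else none) = o
          cases o <;> rfl
      · rw [PySem.Dict.getD_insert_of_ne _ _ _ hssid, PySem.Dict.getD_modify_of_ne _ _ _ hssid]
        rw [PySem.Dict.contains_insert] at hs
        simp [hssid] at hs
        exact hm s hs
  | true =>
    simp only [hc, Bool.true_eq_false, if_false]
    have hgc : groups.contains sid = true := by rw [hcont]; exact hc
    refine ⟨?_, ?_, ?_⟩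
    · rw [PySem.Dict.keys_insert_of_contains _ _ hc, PySem.Dict.keys_modify,
        PySem.Dict.keys_insert_of_contains _ _ hgc, hk]
    · rw [PySem.Dict.keys_insert_of_contains _ _ hc]; exact hnd
    · intro s hs
      by_cases hssid : s = sid
      · subst hssid
        obtain ⟨_, h1, h2⟩ := hm s hc
        rw [PySem.Dict.getD_insert_self]
        have hgrp : (PySem.Dict.modify groups s [] (· ++ [row])).getD s [] =
            groups.getD s [] ++ [row] := PySem.Dict.getD_modify_self _ _ _ _
        rw [hgrp]
        refine ⟨hsid, ?_, ?_⟩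
        · rw [h1, pvName_step s (groups.getD s []) row hsid]
        · exact pvSeries_step _ _ _ _ rfl h2
      · rw [PySem.Dict.getD_insert_of_ne _ _ _ hssid, PySem.Dict.getD_modify_of_ne _ _ _ hssid]
        rw [PySem.Dict.contains_insert] at hs
        simp [hssid] at hs
        exact hm s hs

lemma pvFold_pres (l : List (List (String × Option String)))
    (ma : PySem.Dict String (String × Option String))
    (groups : PySem.Dict String (List (List (String × Option String))))
    (h : pvR ma groups) :
    pvR (l.foldl pvStepA ma) (l.foldl pvStepB groups) := by
  induction l generalizing ma groups with
  | nil => exact h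
  | cons r t ih => exact ih _ _ (pvStep_pres _ _ _ h)

-- ===== VERDICT (by name: the statement is the Claim_ definition above) =====
theorem aggregate_manual_set_stubs_spec : Claim_equal_aggregate_manual_set_stubs := by
  intro card_rows _
  unfold Spec_aggregate_manual_set_stubs aggregate_manual_set_stubs aggregate_manual_set_stubs_alt
  dsimp only
  obtain ⟨hk, hnd, hm⟩ := pvFold_pres card_rows PySem.Dict.empty PySem.Dict.empty
    ⟨by rw [PySem.Dict.keys_empty, PySem.Dict.keys_empty], by rw [PySem.Dict.keys_empty]; exact List.nodup_nil,
     fun s hs => by rw [PySem.Dict.contains_empty] at hs; cases hs⟩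
  set ma := card_rows.foldl pvStepA PySem.Dict.empty with hma
  set gr := card_rows.foldl pvStepB PySem.Dict.empty with hgr
  have hitems := PySem.Dict.items_eq_map_keys ma hnd ("", none)
  have hnds : (PySem.List.sorted ma.keys (fun k => k)).Nodup :=
    ((PySem.List.sorted_perm ma.keys (fun k => k) false).nodup_iff).mpr hnd
  have hlt : (PySem.List.sorted ma.keys (fun k => k)).Pairwise (· < ·) :=
    ((PySem.List.sorted_pairwise ma.keys (fun k => k)).and hnds).imp
      (fun hab => lt_of_le_of_ne hab.1 hab.2)
  have hsorted : PySem.List.sorted ma.items (fun x => x.1) =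
      (PySem.List.sorted ma.keys (fun k => k)).map (fun k => (k, ma.getD k ("", none))) := by
    apply PySem.List.sorted_eq_of_perm_of_pairwise_lt
    · rw [hitems]; exact (PySem.List.sorted_perm _ _ _).map _
    · rw [List.pairwise_map]; exact hlt
  rw [hsorted, List.map_map, ← hk]
  apply List.map_congr_left
  intro k hks
  have hkmem : k ∈ ma.keys := (PySem.List.mem_sorted _ _ _ _).mp hks
  have hc : ma.contains k = true := (PySem.Dict.contains_iff_mem_keys _ _).mpr hkmem
  obtain ⟨hne, h1, h2⟩ := hm k hc
  have hnm : ((gr.getD k []).findSome? (pvNamePick k)).getD k ≠ "" := by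
    cases hf : (gr.getD k []).findSome? (pvNamePick k) with
    | some x =>
      obtain ⟨r, _, hx⟩ := List.exists_of_findSome?_eq_some hf
      simpa [hf] using (pvNamePick_some hx).1
    | none => simpa [hf] using hne
  simp only [Function.comp_apply]
  rw [h1, h2]
  simp [hnm]
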